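-- pv_equiv track=rewrite | github.com/Kinetics20/B_A_P_D | workshop/try_exam/to_test_task.py | name_sorter
-- ===== SOURCE A (Python) =====
-- def name_sorter(any_name_list):
--     my_dict = {'male': [], 'female': []}
--     for word in sorted(any_name_list):
--         if word[-1] == 'a':
--             my_dict['female'].append(word)
--         else:
--             my_dict['male'].append(word)
--     return my_dict
-- ===== SOURCE B (Python) =====
-- def name_sorter(any_name_list):
--     female = sorted(w for w in any_name_list if w[-1] == 'a')
--     male = sorted(w for w in any_name_list if w[-1] != 'a')
--     return {'male': male, 'female': female}
-- ===== Notes on version B (the rewrite author's own statement) =====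
-- stated objective: alternative
-- what changed: Instead of sorting the whole list once and appending into the two dict lists inside one loop, B filters the list into the female/male groups first and sorts each group separately, building the dict directly from the two sorted lists (valid since sort-then-split equals split-then-sort).
import Mathlib
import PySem

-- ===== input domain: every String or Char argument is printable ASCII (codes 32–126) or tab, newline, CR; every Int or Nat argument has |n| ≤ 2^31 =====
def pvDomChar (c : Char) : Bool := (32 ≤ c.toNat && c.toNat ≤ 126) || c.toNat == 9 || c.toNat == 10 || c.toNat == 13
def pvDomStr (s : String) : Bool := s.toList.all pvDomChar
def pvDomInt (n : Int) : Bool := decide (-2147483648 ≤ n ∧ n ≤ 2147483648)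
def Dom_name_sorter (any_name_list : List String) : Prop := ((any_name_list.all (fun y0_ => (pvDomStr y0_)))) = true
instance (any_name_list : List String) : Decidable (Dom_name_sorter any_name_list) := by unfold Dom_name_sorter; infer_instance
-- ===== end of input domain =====

-- B partitions first and sorts each group separately instead of sorting once and
-- splitting inside one loop (alternative decomposition; same O(n log n) cost).

-- ===== PORT A =====
-- A: sort the whole list, then one loop appending each word into my_dict['female']
-- (last char 'a') or my_dict['male']. word[-1] is PySem.Str.pyGet? w (-1); none
-- (empty string, Python IndexError) is excluded by Pre_name_sorter.
def name_sorter (any_name_list : List String) : List (String × List String) :=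
  let my_dict : PySem.Dict String (List String) :=
    (PySem.Dict.empty.insert "male" []).insert "female" []
  let my_dict :=
    (PySem.List.sorted any_name_list (fun x => x) false).foldl
      (fun d word =>
        if PySem.Str.pyGet? word (-1) == some 'a' then
          d.modify "female" [] (fun l => l ++ [word])
        else
          d.modify "male" [] (fun l => l ++ [word])) my_dict
  my_dict.items

-- ===== PORT B =====
def name_sorter_alt (any_name_list : List String) : List (String × List String) :=
  let female := PySem.List.sorted
    (any_name_list.filter (fun w => PySem.Str.pyGet? w (-1) == some 'a')) (fun x => x) false
  let male := PySem.List.sorted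
    (any_name_list.filter (fun w => !(PySem.Str.pyGet? w (-1) == some 'a'))) (fun x => x) false
  [("male", male), ("female", female)]

-- ===== PRECONDITION & SPEC =====
-- Python raises IndexError on word[-1] for an empty string, so Pre_ excludes lists
-- containing the empty string.
def Pre_name_sorter (any_name_list : List String) : Prop :=
  ∀ w ∈ any_name_list, w ≠ ""
instance (any_name_list : List String) : Decidable (Pre_name_sorter any_name_list) := by
  unfold Pre_name_sorter; infer_instance
def pvWitness_name_sorter : List String := ["Anna", "Bob", "Maria"]

def Spec_name_sorter (any_name_list : List String) (out : List (String × List String)) : Prop := out = name_sorter_alt any_name_list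
instance (any_name_list : List String) (out : List (String × List String)) : Decidable (Spec_name_sorter any_name_list out) := by unfold Spec_name_sorter; infer_instance

-- ===== CLAIM (what is proved, stated in full; the proofs are below) =====
def Claim_equal_name_sorter : Prop := ∀ (any_name_list : List String), Dom_name_sorter any_name_list → Pre_name_sorter any_name_list → Spec_name_sorter any_name_list (name_sorter any_name_list)

-- ===== LEMMAS AND PROOFS =====

-- A's loop over ws, started from the two-key dict with accumulated lists m and f,
-- yields items [("male", m ++ filter ¬p ws), ("female", f ++ filter p ws)].
theorem name_sorter_foldl_items (p : String → Bool) (ws m f : List String) :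
    (ws.foldl
      (fun (d : PySem.Dict String (List String)) word =>
        if p word then d.modify "female" [] (fun l => l ++ [word])
        else d.modify "male" [] (fun l => l ++ [word]))
      (PySem.Dict.mk [("male", m), ("female", f)])).items
    = [("male", m ++ ws.filter (fun w => !(p w))), ("female", f ++ ws.filter p)] := by
  induction ws generalizing m f with
  | nil => simp
  | cons w ws ih =>
    by_cases h : p w = true
    · simpa [List.foldl_cons, h, PySem.Dict.modify, PySem.Dict.get?, PySem.Dict.insert,
        PySem.Dict.contains, List.filter_cons] using ih m (f ++ [w])
    · simp only [Bool.not_eq_true] at h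
      simpa [List.foldl_cons, h, PySem.Dict.modify, PySem.Dict.get?, PySem.Dict.insert,
        PySem.Dict.contains, List.filter_cons] using ih (m ++ [w]) f

-- split-then-sort = sort-then-split: filtering a sorted list sorts the filtered list.
theorem sorted_filter_comm (p : String → Bool) (l : List String) :
    PySem.List.sorted (l.filter p) (fun x => x) false
      = (PySem.List.sorted l (fun x => x) false).filter p := by
  apply PySem.List.sorted_id_eq_of_perm_of_pairwise
  · exact (PySem.List.sorted_perm l (fun x => x) false).filter p
  · exact (PySem.List.sorted_pairwise l (fun x => x)).sublist
      List.filter_sublist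

-- ===== VERDICT (by name: the statement is the Claim_ definition above) =====
theorem name_sorter_spec : Claim_equal_name_sorter := by
  intro l _ _
  unfold Spec_name_sorter name_sorter name_sorter_alt
  have hd : (PySem.Dict.empty.insert "male" ([] : List String)).insert "female" []
      = PySem.Dict.mk [("male", []), ("female", [])] := by rfl
  rw [hd, name_sorter_foldl_items, sorted_filter_comm, sorted_filter_comm]
  simp
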